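-- pv_equiv track=rewrite | github.com/Rutgers-Yang-Bao/CS323-Spring-2018 | Assign 2/Assign 2/Problem3.py | funDD
-- ===== SOURCE A (Python) =====
-- def funDD(xs,X,DD,n):
--     answer = 0;
--     for i in range(0,n+1):
--         a = DD[i]
--         b = 1
--         if (i > 0):
--             for j in range(0,i):
--                 b = b * (xs - X[j])
--         answer = answer + a*b;
--     return answer
-- ===== SOURCE B (Python) =====
-- def funDD(xs, X, DD, n):
--     # Horner evaluation of the Newton form, back to front: O(n) instead of O(n^2).
--     if n < 0:
--         return 0
--     answer = DD[n]
--     for i in reversed(range(n)):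
--         answer = answer * (xs - X[i]) + DD[i]
--     return answer
-- ===== Notes on version B (the rewrite author's own statement) =====
-- stated objective: faster
-- what changed: Replaces the quadratic sum that recomputes each Newton basis product with a back-to-front Horner evaluation keeping a single running value.
import Mathlib
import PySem

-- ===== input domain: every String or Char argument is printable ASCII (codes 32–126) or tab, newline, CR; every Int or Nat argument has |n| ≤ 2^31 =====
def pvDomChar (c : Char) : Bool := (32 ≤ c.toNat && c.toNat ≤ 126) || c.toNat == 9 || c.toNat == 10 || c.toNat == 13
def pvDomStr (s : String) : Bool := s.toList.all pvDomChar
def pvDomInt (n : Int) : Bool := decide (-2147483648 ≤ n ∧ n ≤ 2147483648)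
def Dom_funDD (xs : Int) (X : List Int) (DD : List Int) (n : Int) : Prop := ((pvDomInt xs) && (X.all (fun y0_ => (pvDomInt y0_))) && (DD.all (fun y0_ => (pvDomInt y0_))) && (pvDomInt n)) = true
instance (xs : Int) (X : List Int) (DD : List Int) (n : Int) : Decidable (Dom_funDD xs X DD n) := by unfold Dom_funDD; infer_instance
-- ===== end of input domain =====

-- B replaces A's quadratic sum (recomputing each Newton basis product) by a back-to-front Horner evaluation: objective 'faster'.


-- ===== PORT A =====
def funDD (xs : Int) (X : List Int) (DD : List Int) (n : Int) : Int :=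
  (PySem.List.pyRange 0 (n + 1) 1).foldl (fun answer i =>
    let a := PySem.List.pyGetD DD i 0
    let b : Int :=
      if i > 0 then
        (PySem.List.pyRange 0 i 1).foldl (fun b j => b * (xs - PySem.List.pyGetD X j 0)) 1
      else 1
    answer + a * b) 0

-- ===== PORT B =====
def funDD_alt (xs : Int) (X : List Int) (DD : List Int) (n : Int) : Int :=
  if n < 0 then 0
  else
    (PySem.List.pyRange 0 n 1).reverse.foldl
      (fun answer i => answer * (xs - PySem.List.pyGetD X i 0) + PySem.List.pyGetD DD i 0)
      (PySem.List.pyGetD DD n 0)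

-- ===== PRECONDITION & SPEC =====
-- Pre_ excludes exactly the inputs where Python A raises IndexError: it reads DD[0..n] and X[0..n-1].
def Pre_funDD (xs : Int) (X : List Int) (DD : List Int) (n : Int) : Prop :=
  n < 0 ∨ (n < (DD.length : Int) ∧ n ≤ (X.length : Int))
instance (xs : Int) (X : List Int) (DD : List Int) (n : Int) : Decidable (Pre_funDD xs X DD n) := by unfold Pre_funDD; infer_instance

def pvWitness_funDD : Int × List Int × List Int × Int := (2, [1, 3], [4, -1, 5], 2)

def Spec_funDD (xs : Int) (X : List Int) (DD : List Int) (n : Int) (out : Int) : Prop := out = funDD_alt xs X DD n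
instance (xs : Int) (X : List Int) (DD : List Int) (n : Int) (out : Int) : Decidable (Spec_funDD xs X DD n out) := by unfold Spec_funDD; infer_instance

-- ===== CLAIM (what is proved, stated in full; the proofs are below) =====
def Claim_equal_funDD : Prop := ∀ (xs : Int) (X : List Int) (DD : List Int) (n : Int), Dom_funDD xs X DD n → Pre_funDD xs X DD n → Spec_funDD xs X DD n (funDD xs X DD n)

-- ===== LEMMAS AND PROOFS =====

-- the Newton basis product Π_{j<k} x j, as A's inner loop computes it
def pvProd (x : Nat → Int) (k : Nat) : Int := (List.range k).foldl (fun b j => b * x j) 1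

theorem pvProd_succ (x : Nat → Int) (k : Nat) : pvProd x (k + 1) = pvProd x k * x k := by
  simp [pvProd, List.range_succ]

-- Horner fold = closed sum-of-products form (generic in the coefficient and node functions)
theorem horner_eq (x g : Nat → Int) (N : Nat) (c : Int) :
    (List.range N).reverse.foldl (fun a i => a * x i + g i) c
      = c * pvProd x N + (List.range N).foldl (fun ans i => ans + g i * pvProd x i) 0 := by
  induction N generalizing c with
  | zero => simp [pvProd]
  | succ N ih =>
      rw [List.range_succ]
      simp only [List.reverse_append, List.reverse_cons, List.reverse_nil, List.nil_append,
        List.foldl_cons, List.foldl_append, List.foldl_cons, List.foldl_nil]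
      rw [ih, pvProd_succ]
      ring

theorem funDD_spec' (xs : Int) (X : List Int) (DD : List Int) (n : Int) :
    funDD xs X DD n = funDD_alt xs X DD n := by
  by_cases hn : n < 0
  · have h1 : n + 1 ≤ 0 := by omega
    simp [funDD, funDD_alt, hn, PySem.List.pyRange_one_eq_nil h1]
  · obtain ⟨N, rfl⟩ : ∃ N : Nat, n = (N : Int) := ⟨n.toNat, by omega⟩
    set g : Nat → Int := fun k => DD.getD k 0 with hg
    set x : Nat → Int := fun k => xs - X.getD k 0 with hx
    have hstep : ∀ (k : Nat) (ans : Int),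
        (fun answer i =>
          let a := PySem.List.pyGetD DD i 0
          let b : Int :=
            if i > 0 then
              (PySem.List.pyRange 0 i 1).foldl (fun b j => b * (xs - PySem.List.pyGetD X j 0)) 1
            else 1
          answer + a * b) ans ((k : Nat) : Int)
          = ans + g k * pvProd x k := by
      intro k ans
      by_cases hk : 0 < k
      · have : (0:Int) < (k:Int) := by exact_mod_cast hk
        simp only [this, if_pos, PySem.List.pyGetD_natCast, PySem.List.pyRange_zero_natCast,
          List.foldl_map, pvProd]
        simp [hg, hx]
      · have hk0 : k = 0 := by omega
        subst hk0
        simp [pvProd, hg, PySem.List.pyGetD_zero]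
    have hA : funDD xs X DD (N : Int)
        = (List.range (N + 1)).foldl (fun ans k => ans + g k * pvProd x k) 0 := by
      have hcast : ((N : Int) + 1) = ((N + 1 : Nat) : Int) := by push_cast; ring
      rw [funDD, hcast, PySem.List.pyRange_zero_natCast, List.foldl_map]
      exact PySem.List.foldl_congr_mem _ _ _ _ (fun ans a _ => hstep a ans)
    have hB : funDD_alt xs X DD (N : Int)
        = (List.range N).reverse.foldl (fun a i => a * x i + g i) (g N) := by
      rw [funDD_alt, if_neg (by omega), PySem.List.pyRange_zero_natCast,
        PySem.List.pyGetD_natCast, ← List.map_reverse, List.foldl_map]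
      simp only [PySem.List.pyGetD_natCast, hg, hx]
    rw [hA, hB, horner_eq, List.range_succ]
    simp only [List.foldl_append, List.foldl_cons, List.foldl_nil]
    ring

-- ===== VERDICT (by name: the statement is the Claim_ definition above) =====
theorem funDD_spec : Claim_equal_funDD := by
  intro xs X DD n _ _
  exact funDD_spec' xs X DD n
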